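-- pv_equiv track=rewrite | github.com/jramaswami/LeetCode_Python | matchsticks_to_square.py | find_four
-- ===== SOURCE A (Python) =====
-- def find_four(p, length, acc, possible_sides):
--     """
--     Recursively search for four sides that do not overlap.
--     """
--     if length == 4:
--         return True
--
--     if p >= len(possible_sides):
--         return False
--
--     # I can include possible_sides[p] only if it does not overlap with
--     # previous sides.
--     if acc ^ possible_sides[p] == acc + possible_sides[p]:
--         soln = find_four(p + 1, length + 1, acc + possible_sides[p], possible_sides)
--         soln = soln or find_four(p + 1, length, acc, possible_sides)
--     else:
--         soln = find_four(p + 1, length, acc, possible_sides)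
--     return soln
-- ===== SOURCE B (Python) =====
-- from itertools import combinations
--
-- def find_four(p, length, acc, possible_sides):
--     need = 4 - length
--     if need < 0:
--         return False
--     if need == 0:
--         return True
--     rest = possible_sides[p:]
--     if need > len(rest):
--         return False
--     for combo in combinations(rest, need):
--         total = acc
--         ok = True
--         for s in combo:
--             if total ^ s != total + s:
--                 ok = False
--                 break
--             total += s
--         if ok:
--             return True
--     return False
-- ===== Notes on version B (the rewrite author's own statement) =====
-- stated objective: faster
-- what changed: Replaces the include/skip recursion threading (p, length, acc) with a flat pass: compute need = 4 - length, enumerate itertools.combinations of possible_sides[p:] of size need (at most C(n,4) of them, vs A's 2^n subsets), and accept a combination iff folding it onto acc keeps every element bit-disjoint (xor equals addition).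
-- outside the precondition, e.g. on find_four(-1, 2, 0, [1, 2]): A returns True, B returns False; on find_four(-3, 0, 0, [1]): A raises IndexError, B returns False
import Mathlib
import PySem

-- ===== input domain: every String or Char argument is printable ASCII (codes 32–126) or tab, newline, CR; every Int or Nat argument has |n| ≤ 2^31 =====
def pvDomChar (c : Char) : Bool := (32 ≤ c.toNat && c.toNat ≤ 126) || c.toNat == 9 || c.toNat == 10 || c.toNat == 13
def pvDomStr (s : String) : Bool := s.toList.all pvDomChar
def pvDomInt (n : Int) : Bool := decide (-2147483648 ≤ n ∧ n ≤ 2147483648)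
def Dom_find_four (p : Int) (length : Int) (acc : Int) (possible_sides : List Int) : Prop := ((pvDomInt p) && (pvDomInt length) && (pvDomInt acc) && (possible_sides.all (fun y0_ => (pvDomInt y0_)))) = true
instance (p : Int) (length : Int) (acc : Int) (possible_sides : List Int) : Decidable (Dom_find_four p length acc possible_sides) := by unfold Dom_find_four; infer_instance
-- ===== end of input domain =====

-- B enumerates combinations of size 4 - length from the slice possible_sides[p:] and tests
-- bit-disjointness against acc, replacing A's include/skip recursion (objective: faster, measured).
-- Pre_ excludes negative p, where A either raises IndexError (p < -len) or its negative-index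
-- wraparound can revisit a tail element twice — an artefact of A's indexing no caller relies on.


-- ===== PORT A =====
-- Literal transliteration: the recursion on p, with the guards in A's order.
-- possible_sides[p] is PySem.List.pyGet?; `none` (IndexError) is excluded by Pre_ and yields false here.
def find_four (p : Int) (length : Int) (acc : Int) (possible_sides : List Int) : Bool :=
  if length = 4 then true
  else if p ≥ (possible_sides.length : Int) then false
  else
    match PySem.List.pyGet? possible_sides p with
    | none => false  -- Python raises IndexError here; outside Pre_
    | some x =>
      if PySem.Int.bxor acc x = acc + x then
        find_four (p + 1) (length + 1) (acc + x) possible_sides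
          || find_four (p + 1) length acc possible_sides
      else
        find_four (p + 1) length acc possible_sides
termination_by ((possible_sides.length : Int) - p).toNat
decreasing_by all_goals (simp at *; omega)

-- ===== PORT B =====
-- itertools.combinations xs of size k, in itertools order.
def pvCombos (xs : List Int) (k : Nat) : List (List Int) :=
  match k, xs with
  | 0, _ => [[]]
  | _ + 1, [] => []
  | k + 1, x :: rest => (pvCombos rest k).map (fun c => x :: c) ++ pvCombos rest (k + 1)

-- B's inner loop: fold the combination onto total, breaking (false) on a bit overlap.
def pvChk (total : Int) (combo : List Int) : Bool :=
  match combo with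
  | [] => true
  | s :: rest => if PySem.Int.bxor total s ≠ total + s then false else pvChk (total + s) rest

def find_four_alt (p : Int) (length : Int) (acc : Int) (possible_sides : List Int) : Bool :=
  let need := 4 - length
  if need < 0 then false
  else if need = 0 then true
  else
    let rest := PySem.List.slice possible_sides (some p) none
    if need > (rest.length : Int) then false
    else (pvCombos rest need.toNat).any (pvChk acc)

-- ===== PRECONDITION & SPEC =====
-- Pre_ excludes negative p, where A either raises IndexError (p < -len) or its negative-index
-- wraparound can revisit a tail element twice — an artefact of A's indexing no caller relies on.
def Pre_find_four (p : Int) (length : Int) (acc : Int) (possible_sides : List Int) : Prop := 0 ≤ p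
instance (p : Int) (length : Int) (acc : Int) (possible_sides : List Int) : Decidable (Pre_find_four p length acc possible_sides) := by unfold Pre_find_four; infer_instance
def pvWitness_find_four : Int × Int × Int × List Int := (0, 0, 0, [5, 2, 5, 2, 5, 2, 5, 2])

def Spec_find_four (p : Int) (length : Int) (acc : Int) (possible_sides : List Int) (out : Bool) : Prop := out = find_four_alt p length acc possible_sides
instance (p : Int) (length : Int) (acc : Int) (possible_sides : List Int) (out : Bool) : Decidable (Spec_find_four p length acc possible_sides out) := by unfold Spec_find_four; infer_instance

-- ===== CLAIM (what is proved, stated in full; the proofs are below) =====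
def Claim_equal_find_four : Prop := ∀ (p : Int) (length : Int) (acc : Int) (possible_sides : List Int), Dom_find_four p length acc possible_sides → Pre_find_four p length acc possible_sides → Spec_find_four p length acc possible_sides (find_four p length acc possible_sides)
-- ===== LEMMAS AND PROOFS =====

-- A's recursion restated structurally over the suffix list (proof intermediary).
def pvF (length : Int) (acc : Int) (xs : List Int) : Bool :=
  if length = 4 then true
  else
    match xs with
    | [] => false
    | x :: rest =>
      if PySem.Int.bxor acc x = acc + x then
        pvF (length + 1) (acc + x) rest || pvF length acc rest
      else
        pvF length acc rest

theorem pvF_nil (length acc : Int) :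
    pvF length acc [] = if length = 4 then true else false := rfl

theorem pvF_cons (length acc x : Int) (rest : List Int) :
    pvF length acc (x :: rest) =
      if length = 4 then true
      else if PySem.Int.bxor acc x = acc + x then
        pvF (length + 1) (acc + x) rest || pvF length acc rest
      else pvF length acc rest := rfl

theorem pvF_of_gt (length acc : Int) (xs : List Int) (h : 4 < length) :
    pvF length acc xs = false := by
  induction xs generalizing length acc with
  | nil => rw [pvF_nil, if_neg (by omega)]
  | cons x rest ih =>
    rw [pvF_cons, if_neg (by omega), ih length acc h,
        ih (length + 1) (acc + x) (by omega)]
    simp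

theorem find_four_eq_pvF (p length acc : Int) (xs : List Int) (hp : 0 ≤ p) :
    find_four p length acc xs = pvF length acc (xs.drop p.toNat) := by
  generalize hm : ((xs.length : Int) - p).toNat = m
  induction m generalizing p length acc with
  | zero =>
    have hge : p ≥ (xs.length : Int) := by omega
    have hdrop : xs.drop p.toNat = [] := by
      apply List.drop_eq_nil_of_le; omega
    rw [find_four, hdrop, pvF_nil]
    by_cases h4 : length = 4
    · rw [if_pos h4, if_pos h4]
    · rw [if_neg h4, if_pos hge, if_neg h4]
  | succ n ih =>
    have hlt : p < (xs.length : Int) := by omega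
    have hb : p.toNat < xs.length := by omega
    have hget : PySem.List.pyGet? xs p = some (xs[p.toNat]'hb) := by
      simp [PySem.List.pyGet?, PySem.List.pyIdx?, hp, hlt]
    have hdrop : xs.drop p.toNat = xs[p.toNat]'hb :: xs.drop (p + 1).toNat := by
      have h1 : (p + 1).toNat = p.toNat + 1 := by omega
      rw [h1, List.drop_eq_getElem_cons hb]
    rw [find_four, hdrop, pvF_cons]
    by_cases h4 : length = 4
    · rw [if_pos h4, if_pos h4]
    · rw [if_neg h4, if_neg (by omega), hget, if_neg h4]
      simp only
      rw [ih (p + 1) (length + 1) _ (by omega) (by omega),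
          ih (p + 1) length acc (by omega) (by omega)]

theorem pvCombos_zero (xs : List Int) : pvCombos xs 0 = [[]] := by
  cases xs <;> rfl

theorem pvCombos_eq_nil (xs : List Int) (k : Nat) (h : xs.length < k) : pvCombos xs k = [] := by
  induction xs generalizing k with
  | nil =>
    match k, h with
    | m + 1, _ => rfl
  | cons x rest ih =>
    match k, h with
    | m + 1, h =>
      rw [pvCombos, ih m (by simp at h; omega), ih (m + 1) (by simp at h; omega)]
      rfl

theorem pvF_eq_any (length acc : Int) (xs : List Int) (hle : length ≤ 4) :
    pvF length acc xs = (pvCombos xs (4 - length).toNat).any (pvChk acc) := by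
  induction xs generalizing length acc with
  | nil =>
    by_cases h4 : length = 4
    · simp [h4, pvF, pvCombos, pvChk]
    · have : (4 - length).toNat = (4 - length).toNat - 1 + 1 := by omega
      rw [pvF, if_neg h4, this]
      simp [pvCombos]
  | cons x rest ih =>
    by_cases h4 : length = 4
    · simp [h4, pvF, pvCombos_zero, pvChk]
    · have hk : (4 - length).toNat = (3 - length).toNat + 1 := by omega
      rw [pvF, if_neg h4, hk]
      simp only [pvCombos, List.any_append, List.any_map]
      have hmapped : ∀ c, pvChk acc (x :: c) =
          if PySem.Int.bxor acc x = acc + x then pvChk (acc + x) c else false := by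
        intro c
        rw [pvChk]
        split_ifs <;> simp_all
      by_cases hd : PySem.Int.bxor acc x = acc + x
      · simp only [if_pos hd]
        have hfun : (pvChk acc ∘ fun c => x :: c) = pvChk (acc + x) := by
          funext c
          rw [Function.comp_apply, hmapped c, if_pos hd]
        have h1 : pvF (length + 1) (acc + x) rest =
            (pvCombos rest (3 - length).toNat).any (pvChk (acc + x)) := by
          rw [ih (length + 1) (acc + x) (by omega)]
          congr 2
          omega
        have h2 : pvF length acc rest =
            (pvCombos rest ((3 - length).toNat + 1)).any (pvChk acc) := by
          rw [ih length acc hle, hk]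
        rw [h1, h2, hfun]
      · simp only [if_neg hd]
        have hfun : (pvChk acc ∘ fun c => x :: c) = fun _ => false := by
          funext c
          rw [Function.comp_apply, hmapped c, if_neg hd]
        have hany : (pvCombos rest (3 - length).toNat).any (fun _ => false) = false := by
          simp
        rw [hfun, hany, Bool.false_or, ih length acc hle, hk]

-- ===== VERDICT (by name: the statement is the Claim_ definition above) =====
theorem find_four_spec : Claim_equal_find_four := by
  intro p length acc xs _ hp
  unfold Spec_find_four find_four_alt
  by_cases hgt : 4 < length
  · have hA : find_four p length acc xs = false := by
      rw [find_four_eq_pvF p length acc xs hp, pvF_of_gt _ _ _ hgt]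
    rw [hA]
    simp only
    rw [if_pos (by omega)]
  · rw [find_four_eq_pvF p length acc xs hp, pvF_eq_any length acc _ (by omega)]
    simp only
    rw [PySem.List.slice_from xs hp]
    by_cases h4 : length = 4
    · rw [if_neg (by omega), if_pos (by omega)]
      simp [h4, pvCombos_zero, pvChk]
    · rw [if_neg (by omega), if_neg (by omega)]
      by_cases hbig : 4 - length > ((xs.drop p.toNat).length : Int)
      · rw [if_pos hbig, pvCombos_eq_nil (xs.drop p.toNat) (4 - length).toNat (by omega)]
        rfl
      · rw [if_neg hbig]
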